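-- pv_equiv track=rewrite | github.com/sathvikr/ai-stuff | ai_sudoku_solver/sudoku_p3.py | get_constraint_sets
-- ===== SOURCE A (Python) =====
-- def get_constraint_sets(puzzle, puzzle_size, subblock_width, subblock_height):
--     row_constraint_sets = [set() for _ in range(puzzle_size)]
--     col_constraint_sets = [set() for _ in range(puzzle_size)]
--     block_constraint_sets = [set() for _ in range(puzzle_size)]
--
--     block_set_index = 0
--     block_counter = 0
--     total_counted = 0
--
--     for index, cell in enumerate(puzzle):
--         set_index = index // puzzle_size
--
--         row_constraint_sets[set_index].add(index)
--         col_constraint_sets[set_index].add(puzzle_size * (index % puzzle_size) + set_index)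
--         block_constraint_sets[block_set_index].add(index)
--
--         if block_counter < subblock_width - 1:
--             block_counter += 1
--         else:
--             block_set_index += 1
--             block_counter = 0
--
--         if (index + 1) % puzzle_size == 0 and total_counted != puzzle_size * subblock_height - 1:
--             block_set_index -= subblock_height
--
--         if total_counted == puzzle_size * subblock_height - 1:
--             total_counted = 0
--         else:
--             total_counted += 1
--
--     return row_constraint_sets + col_constraint_sets + block_constraint_sets
-- ===== SOURCE B (Python) =====
-- def get_constraint_sets(puzzle, puzzle_size, subblock_width, subblock_height):
--     row_constraint_sets = [set() for _ in range(puzzle_size)]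
--     col_constraint_sets = [set() for _ in range(puzzle_size)]
--     block_constraint_sets = [set() for _ in range(puzzle_size)]
--
--     for index, _cell in enumerate(puzzle):
--         row = index // puzzle_size
--         col = index % puzzle_size
--         block = (row // subblock_height) * (puzzle_size // subblock_width) + col // subblock_width
--
--         row_constraint_sets[row].add(index)
--         col_constraint_sets[row].add(puzzle_size * col + row)
--         block_constraint_sets[block].add(index)
--
--     return row_constraint_sets + col_constraint_sets + block_constraint_sets
-- ===== Notes on version B (the rewrite author's own statement) =====
-- stated objective: simpler
-- what changed: Replaces A's block_set_index/block_counter/total_counted state machine with a closed-form per-cell computation row=index//puzzle_size, col=index%puzzle_size, block=(row//subblock_height)*(puzzle_size//subblock_width)+col//subblock_width.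
-- outside the precondition, e.g. on get_constraint_sets([0], 1, -1, 0): A returns [{0}, {0}, {0}], B raises ZeroDivisionError; on get_constraint_sets([0, 0], 1, 1, 1): A raises IndexError, B raises IndexError
import Mathlib
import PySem

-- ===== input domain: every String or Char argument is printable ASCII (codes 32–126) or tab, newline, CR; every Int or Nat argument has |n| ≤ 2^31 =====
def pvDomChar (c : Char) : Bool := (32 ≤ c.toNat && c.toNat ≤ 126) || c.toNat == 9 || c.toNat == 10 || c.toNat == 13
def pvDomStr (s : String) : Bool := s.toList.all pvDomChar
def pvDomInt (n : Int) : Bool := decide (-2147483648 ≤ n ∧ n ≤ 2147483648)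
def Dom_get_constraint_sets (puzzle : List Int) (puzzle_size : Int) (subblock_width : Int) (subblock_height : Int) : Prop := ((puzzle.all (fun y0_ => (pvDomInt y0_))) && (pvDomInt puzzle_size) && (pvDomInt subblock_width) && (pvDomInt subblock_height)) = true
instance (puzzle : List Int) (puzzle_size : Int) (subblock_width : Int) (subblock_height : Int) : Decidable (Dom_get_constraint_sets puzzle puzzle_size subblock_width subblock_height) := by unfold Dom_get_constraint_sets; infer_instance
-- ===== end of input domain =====

-- B replaces A's block_set_index/block_counter/total_counted state machine with a
-- closed-form per-cell row/col/block computation (objective: simpler).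

-- ===== PORT A =====

-- `lst[i].add(x)` on a list of sets: Python raises IndexError when i is out of
-- range (after negative wrap); those inputs are outside Pre_, where pySetD/pyGetD
-- make the port total (pyGetD/pySetD follow Python's negative-index wrap exactly).
def pvAddAt (xs : List (PySem.Set Int)) (i x : Int) : List (PySem.Set Int) :=
  PySem.List.pySetD xs i (PySem.Set.add (PySem.List.pyGetD xs i PySem.Set.empty) x)

-- A's loop over enumerate(puzzle): state = (index, block_set_index, block_counter,
-- total_counted, row/col/block constraint-set lists); the cell value is unused.
def gcsA_loop (ps sw sh : Int) : List Int → Int → Int → Int → Int →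
    List (PySem.Set Int) → List (PySem.Set Int) → List (PySem.Set Int) → List (List Int)
  | [], _, _, _, _, rows, cols, blocks => rows ++ cols ++ blocks
  | _ :: rest, i, bsi, bc, tc, rows, cols, blocks =>
    let si := PySem.Int.floordiv i ps
    let rows' := pvAddAt rows si i
    let cols' := pvAddAt cols si (ps * PySem.Int.mod i ps + si)
    let blocks' := pvAddAt blocks bsi i
    let p := if bc < sw - 1 then (bsi, bc + 1) else (bsi + 1, (0 : Int))
    let bsi' := if PySem.Int.mod (i + 1) ps = 0 ∧ tc ≠ ps * sh - 1 then p.1 - sh else p.1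
    let tc' := if tc = ps * sh - 1 then 0 else tc + 1
    gcsA_loop ps sw sh rest (i + 1) bsi' p.2 tc' rows' cols' blocks'

def get_constraint_sets (puzzle : List Int) (puzzle_size : Int) (subblock_width : Int) (subblock_height : Int) : List (List Int) :=
  gcsA_loop puzzle_size subblock_width subblock_height puzzle 0 0 0 0
    (List.replicate puzzle_size.toNat PySem.Set.empty)
    (List.replicate puzzle_size.toNat PySem.Set.empty)
    (List.replicate puzzle_size.toNat PySem.Set.empty)

-- ===== PORT B =====

-- B's loop over enumerate(puzzle): no counters, row/col/block computed per cell.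
def gcsB_loop (ps sw sh : Int) : List Int → Int →
    List (PySem.Set Int) → List (PySem.Set Int) → List (PySem.Set Int) → List (List Int)
  | [], _, rows, cols, blocks => rows ++ cols ++ blocks
  | _ :: rest, i, rows, cols, blocks =>
    let row := PySem.Int.floordiv i ps
    let col := PySem.Int.mod i ps
    let block := PySem.Int.floordiv row sh * PySem.Int.floordiv ps sw + PySem.Int.floordiv col sw
    gcsB_loop ps sw sh rest (i + 1)
      (pvAddAt rows row i) (pvAddAt cols row (ps * col + row)) (pvAddAt blocks block i)

def get_constraint_sets_alt (puzzle : List Int) (puzzle_size : Int) (subblock_width : Int) (subblock_height : Int) : List (List Int) :=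
  gcsB_loop puzzle_size subblock_width subblock_height puzzle 0
    (List.replicate puzzle_size.toNat PySem.Set.empty)
    (List.replicate puzzle_size.toNat PySem.Set.empty)
    (List.replicate puzzle_size.toNat PySem.Set.empty)

-- ===== PRECONDITION & SPEC =====
-- Pre_ admits: an empty puzzle (the loop never runs); a single-cell puzzle (all three
-- constraint indices are 0 in both programs); a puzzle that fits in the first
-- row (length ≤ puzzle_size, subblock_width > 0, subblock_height ≠ 0); and valid sudoku
-- dimensions (subblock_width * subblock_height = puzzle_size, both positive) with at
-- most puzzle_size² cells.  Excluded and why: puzzles longer than puzzle_size² (or with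
-- non-positive puzzle_size) make A raise IndexError/ZeroDivisionError, and nonempty
-- multi-row puzzles with malformed dimensions (subblock_width * subblock_height ≠
-- puzzle_size, or non-positive subblock sizes) make A either raise or return accidental
-- block groupings that are artefacts of its counter state machine.
def Pre_get_constraint_sets (puzzle : List Int) (puzzle_size : Int) (subblock_width : Int) (subblock_height : Int) : Prop :=
  puzzle = [] ∨
    (puzzle.length ≤ 1 ∧ 0 < puzzle_size ∧ subblock_width ≠ 0 ∧ subblock_height ≠ 0) ∨
    (0 < subblock_width ∧ subblock_height ≠ 0 ∧
     (puzzle.length : Int) ≤ puzzle_size) ∨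
    (0 < subblock_width ∧ 0 < subblock_height ∧
     subblock_width * subblock_height = puzzle_size ∧
     (puzzle.length : Int) ≤ puzzle_size * puzzle_size)
instance (puzzle : List Int) (puzzle_size : Int) (subblock_width : Int) (subblock_height : Int) : Decidable (Pre_get_constraint_sets puzzle puzzle_size subblock_width subblock_height) := by unfold Pre_get_constraint_sets; infer_instance

def pvWitness_get_constraint_sets : List Int × Int × Int × Int := ([5, 1, 0, 2], 2, 2, 1)

def Spec_get_constraint_sets (puzzle : List Int) (puzzle_size : Int) (subblock_width : Int) (subblock_height : Int) (out : List (List Int)) : Prop := out = get_constraint_sets_alt puzzle puzzle_size subblock_width subblock_height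
instance (puzzle : List Int) (puzzle_size : Int) (subblock_width : Int) (subblock_height : Int) (out : List (List Int)) : Decidable (Spec_get_constraint_sets puzzle puzzle_size subblock_width subblock_height out) := by unfold Spec_get_constraint_sets; infer_instance

-- ===== CLAIM (what is proved, stated in full; the proofs are below) =====
def Claim_equal_get_constraint_sets : Prop := ∀ (puzzle : List Int) (puzzle_size : Int) (subblock_width : Int) (subblock_height : Int), Dom_get_constraint_sets puzzle puzzle_size subblock_width subblock_height → Pre_get_constraint_sets puzzle puzzle_size subblock_width subblock_height → Spec_get_constraint_sets puzzle puzzle_size subblock_width subblock_height (get_constraint_sets puzzle puzzle_size subblock_width subblock_height)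

-- ===== LEMMAS AND PROOFS =====

-- Python's // on a quotient-remainder decomposition (divisor positive).
theorem pv_fd (q c b : Int) (hb : 0 < b) (h0 : 0 ≤ c) (h1 : c < b) :
    PySem.Int.floordiv (q * b + c) b = q := by
  rw [PySem.Int.floordiv_eq_iff_of_pos hb]
  constructor <;> nlinarith

-- Python's % on a quotient-remainder decomposition (divisor positive).
theorem pv_md (q c b : Int) (hb : 0 < b) (h0 : 0 ≤ c) (h1 : c < b) :
    PySem.Int.mod (q * b + c) b = c := by
  have h := PySem.Int.floordiv_mul_add_mod (q * b + c) b
  rw [pv_fd q c b hb h0 h1] at h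
  linarith

-- The heart of the proof: with valid dimensions, A's counters at flat index
-- i = (band*sh + rr)*ps + (u*sw + v)  (band = block band, rr = row within band,
-- u = block column, v = column within block) are block_set_index = band*sh + u,
-- block_counter = v, total_counted = rr*ps + (u*sw + v); from there the two loops
-- produce the same result on any remaining input, since B's closed-form block index
-- equals band*sh + u at every step.
theorem gcs_loop_eq (ps sw sh : Int) (hsw : 0 < sw) (hsh : 0 < sh) (hps : sw * sh = ps)
    (rest : List Int) (band rr u v : Int)
    (hrr0 : 0 ≤ rr) (hrr : rr < sh) (hu0 : 0 ≤ u) (hu : u < sh) (hv0 : 0 ≤ v) (hv : v < sw)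
    (rows cols blocks : List (PySem.Set Int)) :
    gcsA_loop ps sw sh rest ((band * sh + rr) * ps + (u * sw + v)) (band * sh + u) v
      (rr * ps + (u * sw + v)) rows cols blocks
    = gcsB_loop ps sw sh rest ((band * sh + rr) * ps + (u * sw + v)) rows cols blocks := by
  have hps0 : 0 < ps := by nlinarith
  induction rest generalizing band rr u v rows cols blocks with
  | nil => rfl
  | cons x rest ih =>
    have hc0 : 0 ≤ u * sw + v := by nlinarith
    have hc1 : u * sw + v < ps := by nlinarith
    simp only [gcsA_loop, gcsB_loop]
    have hdps : PySem.Int.floordiv ((band * sh + rr) * ps + (u * sw + v)) ps = band * sh + rr :=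
      pv_fd _ _ _ hps0 hc0 hc1
    have hmps : PySem.Int.mod ((band * sh + rr) * ps + (u * sw + v)) ps = u * sw + v :=
      pv_md _ _ _ hps0 hc0 hc1
    have hdsh : PySem.Int.floordiv (band * sh + rr) sh = band := pv_fd band rr sh hsh hrr0 hrr
    have hdsw : PySem.Int.floordiv ps sw = sh := by
      rw [show ps = sh * sw + 0 by nlinarith [mul_comm sw sh]]
      exact pv_fd sh 0 sw hsw le_rfl hsw
    have hdc : PySem.Int.floordiv (u * sw + v) sw = u := pv_fd u v sw hsw hv0 hv
    rw [hdps, hmps, hdsh, hdsw, hdc]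
    by_cases hvc : v < sw - 1
    · -- mid-block: only block_counter advances
      have hmn : PySem.Int.mod ((band * sh + rr) * ps + (u * sw + v) + 1) ps = u * sw + (v + 1) := by
        rw [show (band * sh + rr) * ps + (u * sw + v) + 1 = (band * sh + rr) * ps + (u * sw + (v + 1)) by ring]
        exact pv_md _ _ _ hps0 (by nlinarith) (by nlinarith)
      rw [hmn]
      have h1 : ¬(u * sw + (v + 1) = 0 ∧ rr * ps + (u * sw + v) ≠ ps * sh - 1) := by
        rintro ⟨h1, -⟩; nlinarith
      have h2 : ¬(rr * ps + (u * sw + v) = ps * sh - 1) := by intro h; nlinarith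
      rw [if_pos hvc, if_neg h1, if_neg h2]
      dsimp only
      rw [show (band * sh + rr) * ps + (u * sw + v) + 1 = (band * sh + rr) * ps + (u * sw + (v + 1)) by ring,
          show rr * ps + (u * sw + v) + 1 = rr * ps + (u * sw + (v + 1)) by ring]
      exact ih band rr u (v + 1) hrr0 hrr hu0 hu (by linarith) (by omega) _ _ _
    · -- end of a block: v = sw - 1
      have hv1 : v = sw - 1 := by omega
      subst hv1
      by_cases huc : u < sh - 1
      · -- next block in the same row
        have hmn : PySem.Int.mod ((band * sh + rr) * ps + (u * sw + (sw - 1)) + 1) ps = (u + 1) * sw := by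
          rw [show (band * sh + rr) * ps + (u * sw + (sw - 1)) + 1 = (band * sh + rr) * ps + (u + 1) * sw by ring]
          exact pv_md _ _ _ hps0 (by nlinarith) (by nlinarith)
        rw [hmn]
        have h0 : ¬(sw - 1 < sw - 1) := by omega
        have h1 : ¬((u + 1) * sw = 0 ∧ rr * ps + (u * sw + (sw - 1)) ≠ ps * sh - 1) := by
          rintro ⟨h1, -⟩; nlinarith
        have h2 : ¬(rr * ps + (u * sw + (sw - 1)) = ps * sh - 1) := by intro h; nlinarith
        rw [if_neg h0, if_neg h1, if_neg h2]
        dsimp only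
        rw [show (band * sh + rr) * ps + (u * sw + (sw - 1)) + 1 = (band * sh + rr) * ps + ((u + 1) * sw + 0) by ring,
            show rr * ps + (u * sw + (sw - 1)) + 1 = rr * ps + ((u + 1) * sw + 0) by ring,
            show band * sh + u + 1 = band * sh + (u + 1) by ring]
        exact ih band rr (u + 1) 0 hrr0 hrr (by omega) (by omega) le_rfl hsw _ _ _
      · have hu1 : u = sh - 1 := by omega
        subst hu1
        have hmn : PySem.Int.mod ((band * sh + rr) * ps + ((sh - 1) * sw + (sw - 1)) + 1) ps = 0 := by
          rw [show (band * sh + rr) * ps + ((sh - 1) * sw + (sw - 1)) + 1 = (band * sh + (rr + 1)) * ps + 0 by linear_combination hps]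
          exact pv_md _ _ _ hps0 le_rfl hps0
        rw [hmn]
        by_cases hrc : rr < sh - 1
        · -- end of a row inside a band: block_set_index rewinds by subblock_height
          have htc : rr * ps + ((sh - 1) * sw + (sw - 1)) ≠ ps * sh - 1 := by intro h; nlinarith
          have h0 : ¬(sw - 1 < sw - 1) := by omega
          rw [if_neg h0, if_pos (⟨rfl, htc⟩ : (0 : Int) = 0 ∧ rr * ps + ((sh - 1) * sw + (sw - 1)) ≠ ps * sh - 1), if_neg htc]
          dsimp only
          rw [show (band * sh + rr) * ps + ((sh - 1) * sw + (sw - 1)) + 1 = (band * sh + (rr + 1)) * ps + (0 * sw + 0) by linear_combination hps,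
              show band * sh + (sh - 1) + 1 - sh = band * sh + 0 by ring,
              show rr * ps + ((sh - 1) * sw + (sw - 1)) + 1 = (rr + 1) * ps + (0 * sw + 0) by linear_combination hps]
          exact ih band (rr + 1) 0 0 (by omega) (by omega) le_rfl hsh le_rfl hsw _ _ _
        · -- end of a band: counters reset
          have hr1 : rr = sh - 1 := by omega
          subst hr1
          have htc : (sh - 1) * ps + ((sh - 1) * sw + (sw - 1)) = ps * sh - 1 := by linear_combination hps
          have h0 : ¬(sw - 1 < sw - 1) := by omega
          have h1 : ¬((0 : Int) = 0 ∧ (sh - 1) * ps + ((sh - 1) * sw + (sw - 1)) ≠ ps * sh - 1) := by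
            rintro ⟨-, h2⟩; exact h2 htc
          rw [if_neg h0, if_neg h1, if_pos htc]
          dsimp only
          rw [show (band * sh + (sh - 1)) * ps + ((sh - 1) * sw + (sw - 1)) + 1 = ((band + 1) * sh + 0) * ps + (0 * sw + 0) by linear_combination hps,
              show band * sh + (sh - 1) + 1 = (band + 1) * sh + 0 by ring]
          simpa using ih (band + 1) 0 0 0 le_rfl hsh le_rfl hsh le_rfl hsw _ _ _


-- Python's 0 // b = 0 for every nonzero b (floor division toward the divisor's sign).
theorem pv_fd_zero (b : Int) (hb : b ≠ 0) : PySem.Int.floordiv 0 b = 0 := by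
  have h := PySem.Int.floordiv_mul_add_mod 0 b
  rcases lt_or_gt_of_ne hb with hneg | hpos
  · have h1 := PySem.Int.mod_neg_bounds 0 (b := b) hneg
    nlinarith [h1.1, h1.2]
  · have h1 := PySem.Int.mod_nonneg 0 hpos
    have h2 := PySem.Int.mod_lt 0 hpos
    nlinarith

-- Single-row case: while every index is below puzzle_size, A's block_set_index is
-- simply index // subblock_width, which is B's closed-form block index (row 0).
theorem gcs_row_eq (ps sw sh : Int) (hps0 : 0 < ps) (hsw : 0 < sw) (hsh : sh ≠ 0)
    (rest : List Int) (u v t : Int) (hu0 : 0 ≤ u) (hv0 : 0 ≤ v) (hv : v < sw)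
    (hb : u * sw + v + rest.length ≤ ps)
    (rows cols blocks : List (PySem.Set Int)) :
    gcsA_loop ps sw sh rest (u * sw + v) u v t rows cols blocks
    = gcsB_loop ps sw sh rest (u * sw + v) rows cols blocks := by
  induction rest generalizing u v t rows cols blocks with
  | nil => rfl
  | cons x tail ih =>
    have hlen : (0 : Int) ≤ tail.length := Int.natCast_nonneg _
    have hilt : u * sw + v < ps := by
      have : (((x :: tail).length : Int)) = tail.length + 1 := by simp
      rw [this] at hb; linarith
    have hi0 : 0 ≤ u * sw + v := by nlinarith
    simp only [gcsA_loop, gcsB_loop]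
    have hdps : PySem.Int.floordiv (u * sw + v) ps = 0 := by
      have := pv_fd 0 (u * sw + v) ps hps0 hi0 hilt
      simpa using this
    have hmps : PySem.Int.mod (u * sw + v) ps = u * sw + v := by
      have := pv_md 0 (u * sw + v) ps hps0 hi0 hilt
      simpa using this
    have hdc : PySem.Int.floordiv (u * sw + v) sw = u := pv_fd u v sw hsw hv0 hv
    rw [hdps, hmps, hdc, pv_fd_zero sh hsh]
    simp only [zero_mul, zero_add]
    rcases tail with - | ⟨y, tail'⟩
    · rfl
    · have hb' : u * sw + v + 1 + ((y :: tail').length : Int) ≤ ps := by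
        have : (((x :: y :: tail').length : Int)) = (y :: tail').length + 1 := by simp
        rw [this] at hb; linarith
      have hlt1 : u * sw + v + 1 < ps := by
        have : (0 : Int) < ((y :: tail').length : Int) := by exact_mod_cast Nat.succ_pos tail'.length
        linarith
      have hmn : PySem.Int.mod (u * sw + v + 1) ps = u * sw + v + 1 := by
        have := pv_md 0 (u * sw + v + 1) ps hps0 (by linarith) hlt1
        simpa using this
      rw [hmn]
      have hcond : ¬(u * sw + v + 1 = 0 ∧ t ≠ ps * sh - 1) := by
        rintro ⟨h1, -⟩; omega
      rw [if_neg hcond]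
      by_cases hvc : v < sw - 1
      · rw [if_pos hvc]
        dsimp only
        rw [show u * sw + v + 1 = u * sw + (v + 1) by ring]
        exact ih u (v + 1) _ hu0 (by linarith) (by omega)
          (by rw [show u * sw + (v + 1) = u * sw + v + 1 by ring]; exact hb') _ _ _
      · have hv1 : v = sw - 1 := by omega
        subst hv1
        rw [if_neg (by omega)]
        dsimp only
        rw [show u * sw + (sw - 1) + 1 = (u + 1) * sw + 0 by ring]
        exact ih (u + 1) 0 _ (by linarith) le_rfl hsw
          (by rw [show (u + 1) * sw + 0 = u * sw + (sw - 1) + 1 by ring]; exact hb') _ _ _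

-- Single-cell case: the only visited index is 0, and every division yields 0.
theorem gcs_one_eq (ps sw sh : Int) (hps0 : 0 < ps) (hsw : sw ≠ 0) (hsh : sh ≠ 0)
    (z : Int) (rows cols blocks : List (PySem.Set Int)) :
    gcsA_loop ps sw sh [z] 0 0 0 0 rows cols blocks
    = gcsB_loop ps sw sh [z] 0 rows cols blocks := by
  have h0 : PySem.Int.floordiv 0 ps = 0 := pv_fd_zero ps (by omega)
  have h1 : PySem.Int.mod 0 ps = 0 := by
    have := PySem.Int.floordiv_mul_add_mod 0 ps
    rw [h0] at this; linarith
  simp only [gcsA_loop, gcsB_loop, h0, h1, pv_fd_zero sw hsw, pv_fd_zero sh hsh,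
    zero_mul, mul_zero, add_zero]

-- ===== VERDICT (by name: the statement is the Claim_ definition above) =====
theorem get_constraint_sets_spec : Claim_equal_get_constraint_sets := by
  intro puzzle ps sw sh _hdom hpre
  unfold Spec_get_constraint_sets get_constraint_sets get_constraint_sets_alt
  rcases hpre with h | ⟨hlen1, hps0, hsw, hsh⟩ | ⟨hsw, hsh, hlen⟩ | ⟨hsw, hsh, hps, _hlen⟩
  · subst h; rfl
  · rcases puzzle with - | ⟨z, puz⟩
    · rfl
    · rcases puz with - | ⟨w, puz'⟩
      · exact gcs_one_eq ps sw sh hps0 hsw hsh z _ _ _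
      · simp at hlen1
  · rcases puzzle with - | ⟨z, puz⟩
    · rfl
    · have hps0 : 0 < ps := by
        have : (1 : Int) ≤ ((z :: puz).length : Int) := by exact_mod_cast Nat.succ_le_succ (Nat.zero_le puz.length)
        linarith
      have := gcs_row_eq ps sw sh hps0 hsw hsh (z :: puz) 0 0 0
        le_rfl le_rfl hsw (by simpa using hlen)
        (List.replicate ps.toNat PySem.Set.empty)
        (List.replicate ps.toNat PySem.Set.empty)
        (List.replicate ps.toNat PySem.Set.empty)
      simpa using this
  · have := gcs_loop_eq ps sw sh hsw hsh hps puzzle 0 0 0 0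
      le_rfl hsh le_rfl hsh le_rfl hsw
      (List.replicate ps.toNat PySem.Set.empty)
      (List.replicate ps.toNat PySem.Set.empty)
      (List.replicate ps.toNat PySem.Set.empty)
    simpa using this
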